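-- pv_equiv track=rewrite | github.com/nahom4/codeforces_problems | C_Avoid_Minimums.py | solve
-- ===== SOURCE A (Python) =====
-- def solve(A,n,k):
--     mx = max(A)
--     base_score = 0
--     mn = min(A)
--
--     for i in range(len(A)):
--         base_score += mx - A[i]
--
--     if k < base_score: # impossible
--         return -1
--
--     diff = k - base_score
--     new_max = diff // n + mx
--
--     A.sort()
--
--     score = 0
--
--     for i in range(1,n):
--         score += (new_max - A[i])
--
--     return score - (A.count(mn) - 1)
-- ===== SOURCE B (Python) =====
-- def solve(A, n, k):
--     # counter-based: one pass builds a frequency table and the total; extrema and the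
--     # "sum of the n smallest" are then read off the table (sorted distinct values with
--     # multiplicities) -- the full list is never sorted and never scanned again.
--     freq = {}
--     total = 0
--     for x in A:
--         freq[x] = freq.get(x, 0) + 1
--         total += x
--     mn = min(freq)
--     mx = max(freq)
--     deficit = len(A) * mx - total
--     if k < deficit:  # impossible
--         return -1
--     new_max = (k - deficit) // n + mx
--     need = n
--     small = 0   # sum of the n smallest elements of A
--     for v in sorted(freq):
--         take = freq[v] if freq[v] < need else need
--         small += v * take
--         need -= take
--         if need <= 0:
--             break
--     return (n - 1) * new_max - (small - mn) - (freq[mn] - 1)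
-- ===== Notes on version B (the rewrite author's own statement) =====
-- stated objective: alternative
-- what changed: B never sorts or rescans the full list: one pass builds a value->count table and the running total, min/max are taken over the table's keys, and the 'sum over sorted A[1:n]' loop is replaced by a grouped scan of the sorted DISTINCT values with multiplicities (take=min(count,need), early break), with the final count read from the table; A sorts its argument in place, B does not mutate it.
-- outside the precondition, e.g. on solve([1, 2], -1, 100): A returns 0, B returns 196
import Mathlib
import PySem

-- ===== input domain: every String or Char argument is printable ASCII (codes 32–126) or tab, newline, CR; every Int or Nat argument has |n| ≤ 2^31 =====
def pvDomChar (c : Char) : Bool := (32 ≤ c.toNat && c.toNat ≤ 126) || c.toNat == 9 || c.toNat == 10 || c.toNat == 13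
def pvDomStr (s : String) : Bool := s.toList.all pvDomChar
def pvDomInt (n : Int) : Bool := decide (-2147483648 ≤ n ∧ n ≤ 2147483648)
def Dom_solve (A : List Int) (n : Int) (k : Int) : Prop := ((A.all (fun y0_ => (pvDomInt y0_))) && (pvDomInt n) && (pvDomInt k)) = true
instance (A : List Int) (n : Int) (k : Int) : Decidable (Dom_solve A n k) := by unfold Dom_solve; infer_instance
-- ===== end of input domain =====

-- B replaces A's sort-and-rescan of the list by a value→count table built in one pass:
-- min/max/count are read from the table and the score sum is a grouped scan of the sorted
-- DISTINCT values with multiplicities; A sorts its argument in place, B does not mutate it —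
-- the equivalence proved here is about the return value only.

-- ===== PORT A =====
def solve (A : List Int) (n : Int) (k : Int) : Int :=
  let mx := (PySem.List.max? A (fun x => x)).getD 0
  let mn := (PySem.List.min? A (fun x => x)).getD 0
  let base_score := (PySem.List.pyRange 0 (A.length : Int) 1).foldl
      (fun acc i => acc + (mx - PySem.List.pyGetD A i 0)) 0
  if k < base_score then -1
  else
    let diff := k - base_score
    let new_max := PySem.Int.floordiv diff n + mx
    let As := PySem.List.sorted A (fun x => x) false
    let score := (PySem.List.pyRange 1 n 1).foldl
      (fun acc i => acc + (new_max - PySem.List.pyGetD As i 0)) 0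
    score - ((PySem.List.count As mn : Int) - 1)

-- ===== PORT B =====
-- B's grouped-scan loop: 'for v in sorted(freq): take = freq[v] if freq[v] < need else need;
-- small += v*take; need -= take; if need <= 0: break'
def sumSmallLoop (ks : List Int) (freq : PySem.Dict Int Int) (small need : Int) : Int :=
  match ks with
  | [] => small
  | v :: rest =>
    let c := PySem.Dict.getD freq v 0
    let take := if c < need then c else need
    let small' := small + v * take
    let need' := need - take
    if need' ≤ 0 then small' else sumSmallLoop rest freq small' need'

def solve_alt (A : List Int) (n : Int) (k : Int) : Int :=
  let ft := A.foldl (fun (st : PySem.Dict Int Int × Int) x =>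
      (st.1.insert x (st.1.getD x 0 + 1), st.2 + x)) (PySem.Dict.empty, 0)
  let freq := ft.1
  let total := ft.2
  let mn := (PySem.List.min? freq.keys (fun x => x)).getD 0
  let mx := (PySem.List.max? freq.keys (fun x => x)).getD 0
  let deficit := (A.length : Int) * mx - total
  if k < deficit then -1
  else
    let new_max := PySem.Int.floordiv (k - deficit) n + mx
    let small := sumSmallLoop (PySem.List.sorted freq.keys (fun x => x) false) freq 0 n
    (n - 1) * new_max - (small - mn) - (freq.getD mn 0 - 1)

-- ===== PRECONDITION & SPEC =====
-- Pre_ restricts to the natural domain: A nonempty (max/min of [] raise in both programs) and,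
-- unless the impossible branch k < len(A)*max(A)-sum(A) returns -1 early, 1 ≤ n ≤ len(A)
-- (n = 0 makes diff // n raise, n > len(A) makes A[i] raise; n < 0 is a negative count outside
-- the task's natural domain — the repository's caller passes n = len(A) — on which A's empty
-- score loop yields an accidental value B does not reproduce).
def Pre_solve (A : List Int) (n : Int) (k : Int) : Prop :=
  A ≠ [] ∧
    (k < (A.length : Int) * ((PySem.List.max? A (fun x => x)).getD 0) - A.sum ∨
      (1 ≤ n ∧ n ≤ (A.length : Int)))
instance (A : List Int) (n : Int) (k : Int) : Decidable (Pre_solve A n k) := by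
  unfold Pre_solve; infer_instance
def pvWitness_solve : List Int × Int × Int := ([3, 1, 2], 3, 10)

def Spec_solve (A : List Int) (n : Int) (k : Int) (out : Int) : Prop := out = solve_alt A n k
instance (A : List Int) (n : Int) (k : Int) (out : Int) : Decidable (Spec_solve A n k out) := by
  unfold Spec_solve; infer_instance

-- ===== CLAIM (what is proved, stated in full; the proofs are below) =====
def Claim_equal_solve : Prop := ∀ (A : List Int) (n : Int) (k : Int),
  Dom_solve A n k → Pre_solve A n k → Spec_solve A n k (solve A n k)

-- ===== LEMMAS AND PROOFS =====

-- folding 'acc + (c - x)' over a list is 'init + length·c - sum'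
theorem foldl_sub_sum (l : List Int) (init c : Int) :
    l.foldl (fun acc x => acc + (c - x)) init = init + (l.length : Int) * c - l.sum := by
  induction l generalizing init with
  | nil => simp
  | cons h t ih =>
    simp only [List.foldl_cons, ih, List.length_cons, List.sum_cons]
    push_cast
    ring

-- map of pyGetD over a prefix range is the take of the drop
theorem map_pyGetD_pyRange_take (xs : List Int) (a b : Int) (d : Int)
    (h0 : 0 ≤ a) (hab : a ≤ b) (hb : b ≤ (xs.length : Int)) :
    (PySem.List.pyRange a b 1).map (fun i => PySem.List.pyGetD xs i d)
      = (xs.drop a.toNat).take (b.toNat - a.toNat) := by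
  have hsplit : PySem.List.pyRange a (xs.length : Int) 1
      = PySem.List.pyRange a b 1 ++ PySem.List.pyRange b (xs.length : Int) 1 :=
    PySem.List.pyRange_one_append a b (xs.length : Int) hab hb
  have hwhole := PySem.List.map_pyGetD_pyRange' xs d h0
  rw [hsplit, List.map_append] at hwhole
  have hlen : ((PySem.List.pyRange a b 1).map (fun i => PySem.List.pyGetD xs i d)).length
      = b.toNat - a.toNat := by
    rw [List.length_map, PySem.List.length_pyRange_one]
    omega
  calc (PySem.List.pyRange a b 1).map (fun i => PySem.List.pyGetD xs i d)
      = ((PySem.List.pyRange a b 1).map (fun i => PySem.List.pyGetD xs i d)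
          ++ (PySem.List.pyRange b (xs.length : Int) 1).map (fun i => PySem.List.pyGetD xs i d)).take
          (b.toNat - a.toNat) := by
        rw [List.take_append_of_le_length (by omega), ← hlen, List.take_length]
    _ = (xs.drop a.toNat).take (b.toNat - a.toNat) := by rw [hwhole]


theorem min?_id_eq_of_mem_iff (xs ys : List Int) (h : ∀ a : Int, a ∈ xs ↔ a ∈ ys) :
    PySem.List.min? xs (fun x => x) = PySem.List.min? ys (fun x => x) := by
  cases hx : PySem.List.min? xs (fun x => x) with
  | none =>
    rw [PySem.List.min?_eq_none_iff] at hx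
    cases hy : PySem.List.min? ys (fun x => x) with
    | none => rfl
    | some m =>
      have hm := PySem.List.min?_mem hy
      have := (h m).mpr hm
      simp [hx] at this
  | some m1 =>
    cases hy : PySem.List.min? ys (fun x => x) with
    | none =>
      rw [PySem.List.min?_eq_none_iff] at hy
      have hm := PySem.List.min?_mem hx
      have := (h m1).mp hm
      simp [hy] at this
    | some m2 =>
      have h1 := PySem.List.min?_mem hx
      have h2 := PySem.List.min?_mem hy
      have l1 := PySem.List.min?_isMin hx m2 ((h m2).mpr h2)
      have l2 := PySem.List.min?_isMin hy m1 ((h m1).mp h1)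
      have : m1 = m2 := le_antisymm l1 l2
      rw [this]


theorem max?_id_eq_of_mem_iff (xs ys : List Int) (h : ∀ a : Int, a ∈ xs ↔ a ∈ ys) :
    PySem.List.max? xs (fun x => x) = PySem.List.max? ys (fun x => x) := by
  cases hx : PySem.List.max? xs (fun x => x) with
  | none =>
    rw [PySem.List.max?_eq_none_iff] at hx
    cases hy : PySem.List.max? ys (fun x => x) with
    | none => rfl
    | some m =>
      have hm := PySem.List.max?_mem hy
      have := (h m).mpr hm
      simp [hx] at this
  | some m1 =>
    cases hy : PySem.List.max? ys (fun x => x) with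
    | none =>
      rw [PySem.List.max?_eq_none_iff] at hy
      have hm := PySem.List.max?_mem hx
      have := (h m1).mp hm
      simp [hy] at this
    | some m2 =>
      have h1 := PySem.List.max?_mem hx
      have h2 := PySem.List.max?_mem hy
      have l1 := PySem.List.max?_isMax hx m2 ((h m2).mpr h2)
      have l2 := PySem.List.max?_isMax hy m1 ((h m1).mp h1)
      have : m2 = m1 := le_antisymm l1 l2
      rw [this]

theorem head_sorted_eq_min (A : List Int) (m : Int) (t : List Int)
    (h : PySem.List.sorted A (fun x => x) false = m :: t) :
    m = (PySem.List.min? A (fun x => x)).getD 0 := by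
  have hmA : m ∈ A := by
    have : m ∈ PySem.List.sorted A (fun x => x) false := by rw [h]; exact List.mem_cons_self
    rwa [PySem.List.mem_sorted] at this
  cases hmin : PySem.List.min? A (fun x => x) with
  | none =>
    rw [PySem.List.min?_eq_none_iff] at hmin
    simp [hmin] at hmA
  | some mn =>
    have h1 := PySem.List.min?_isMin hmin m hmA
    have h2 := PySem.List.key_head_sorted_le A (fun x => x) h mn (PySem.List.min?_mem hmin)
    exact le_antisymm h2 h1


theorem pairwise_le_flat (ks : List Int) (cnt : Int → Nat) (h : ks.Pairwise (· < ·)) :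
    (ks.flatMap (fun v => List.replicate (cnt v) v)).Pairwise (· ≤ ·) := by
  induction ks with
  | nil => simp
  | cons v rest ih =>
    rw [List.pairwise_cons] at h
    rw [List.flatMap_cons, List.pairwise_append]
    refine ⟨?_, ih h.2, ?_⟩
    · exact List.pairwise_replicate.mpr (Or.inr le_rfl)
    · intro a ha b hb
      obtain rfl := List.eq_of_mem_replicate ha
      obtain ⟨u, hu, hb⟩ := List.mem_flatMap.mp hb
      obtain rfl := List.eq_of_mem_replicate hb
      exact le_of_lt (h.1 _ hu)

theorem count_flat (ks : List Int) (cnt : Int → Nat) (hnd : ks.Nodup) (a : Int) :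
    (ks.flatMap (fun v => List.replicate (cnt v) v)).count a = if a ∈ ks then cnt a else 0 := by
  induction ks with
  | nil => simp
  | cons v rest ih =>
    rw [List.nodup_cons] at hnd
    rw [List.flatMap_cons, List.count_append, List.count_replicate, ih hnd.2]
    by_cases hav : a = v
    · subst hav
      have : a ∉ rest := hnd.1
      simp [this]
    · simp [hav, Ne.symm hav]

theorem sorted_eq_flat_groups (A : List Int) :
    PySem.List.sorted A (fun x => x) false
      = (PySem.List.sorted (PySem.Set.ofList A) (fun x => x) false).flatMap
          (fun v => List.replicate (A.count v) v) := by
  set ks := PySem.List.sorted (PySem.Set.ofList A) (fun x => x) false with hks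
  have hlt : ks.Pairwise (· < ·) := PySem.List.sorted_ofList_pairwise_lt A
  have hnd : ks.Nodup := hlt.imp ne_of_lt
  have hmem : ∀ a : Int, a ∈ ks ↔ a ∈ A := by
    intro a
    rw [hks, PySem.List.mem_sorted, PySem.Set.mem_ofList]
  apply PySem.List.sorted_id_eq_of_perm_of_pairwise
  · rw [List.perm_iff_count]
    intro a
    rw [count_flat ks (fun v => A.count v) hnd a]
    by_cases ha : a ∈ A
    · simp [(hmem a).mpr ha]
    · have : a ∉ ks := fun h => ha ((hmem a).mp h)
      simp [this, List.count_eq_zero.mpr ha]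
  · exact pairwise_le_flat ks _ hlt

theorem sumSmallLoop_spec (A : List Int) (freq : PySem.Dict Int Int)
    (hfreq : ∀ v : Int, freq.getD v 0 = (A.count v : Int))
    (ks : List Int) (small need : Int) (hneed : 1 ≤ need) :
    sumSmallLoop ks freq small need
      = small + ((ks.flatMap (fun v => List.replicate (A.count v) v)).take need.toNat).sum := by
  induction ks generalizing small need with
  | nil => simp [sumSmallLoop]
  | cons v rest ih =>
    rw [List.flatMap_cons, List.take_append, List.take_replicate,
      List.length_replicate]
    show (let c := PySem.Dict.getD freq v 0
      let take := if c < need then c else need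
      let small' := small + v * take
      let need' := need - take
      if need' ≤ 0 then small' else sumSmallLoop rest freq small' need') = _
    simp only [hfreq v]
    by_cases hc : (A.count v : Int) < need
    · have hle : A.count v ≤ need.toNat := by omega
      have hne : ¬ (need - (A.count v : Int) ≤ 0) := by omega
      simp only [if_pos hc, if_neg hne]
      rw [ih (small + v * (A.count v : Int)) (need - (A.count v : Int)) (by omega)]
      have h1 : min need.toNat (A.count v) = A.count v := by omega
      have h2 : (need - (A.count v : Int)).toNat = need.toNat - A.count v := by omega
      rw [h1, h2, List.sum_append, List.sum_replicate, nsmul_eq_mul]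
      ring
    · have h0 : need - need ≤ 0 := by omega
      simp only [if_neg hc, if_pos h0]
      have h1 : min need.toNat (A.count v) = need.toNat := by omega
      have h2 : need.toNat - A.count v = 0 := by omega
      rw [h1, h2, List.take_zero, List.sum_append, List.sum_replicate, nsmul_eq_mul]
      simp
      rw [max_eq_left (by omega : (0:Int) ≤ need)]
      ring

-- ===== VERDICT (by name: the statement is the Claim_ definition above) =====
theorem solve_spec : Claim_equal_solve := by
  unfold Claim_equal_solve
  intro A n k _ hpre
  obtain ⟨hA, hcase⟩ := hpre
  unfold Spec_solve solve solve_alt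
  simp only
  rw [PySem.List.foldl_prod_mk
        (f := fun (d : PySem.Dict Int Int) (x : Int) => d.insert x (d.getD x 0 + 1))
        (g := fun (t : Int) (x : Int) => t + x)]
  simp only
  have hcounter : A.foldl (fun (d : PySem.Dict Int Int) (x : Int) =>
      d.insert x (d.getD x 0 + 1)) PySem.Dict.empty = PySem.Dict.counter A :=
    PySem.Dict.foldl_insert_getD_add_one_eq_counter A
  have hsum : A.foldl (fun (t : Int) (x : Int) => t + x) 0 = A.sum := by
    simpa using PySem.List.foldl_add (g := fun x : Int => x) (l := A) (a := 0)
  rw [hcounter, hsum, PySem.Dict.keys_counter]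
  have hmemof : ∀ a : Int, a ∈ PySem.Set.ofList A ↔ a ∈ A := fun a => PySem.Set.mem_ofList A a
  rw [min?_id_eq_of_mem_iff (PySem.Set.ofList A) A hmemof,
      max?_id_eq_of_mem_iff (PySem.Set.ofList A) A hmemof]
  set mx := (PySem.List.max? A (fun x => x)).getD 0 with hmx
  set mn := (PySem.List.min? A (fun x => x)).getD 0 with hmn
  have hbase : (PySem.List.pyRange 0 (A.length : Int) 1).foldl
      (fun acc i => acc + (mx - PySem.List.pyGetD A i 0)) 0
      = (A.length : Int) * mx - A.sum := by
    have h := PySem.List.foldl_pyRange_zero_pyGetD A 0 (fun acc x => acc + (mx - x)) 0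
    simp only [PySem.List.len_eq] at h
    rw [h, foldl_sub_sum]
    ring
  rw [hbase]
  split
  · rfl
  next hk =>
    have hn : 1 ≤ n ∧ n ≤ (A.length : Int) := by
      rcases hcase with h | h
      · exact absurd h hk
      · exact h
    set As := PySem.List.sorted A (fun x => x) false with hAs
    have hlenAs : As.length = A.length := PySem.List.length_sorted A _ false
    have hperm : As.Perm A := PySem.List.sorted_perm A _ false
    set new_max := PySem.Int.floordiv (k - ((A.length : Int) * mx - A.sum)) n + mx with hnm
    -- A's score loop sums indices 1 … n-1 of the sorted list
    have hmap : (PySem.List.pyRange 1 n 1).map (fun i => PySem.List.pyGetD As i 0)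
        = (As.drop 1).take (n.toNat - 1) := by
      have := map_pyGetD_pyRange_take As 1 n 0 (by omega) hn.1 (by rw [hlenAs]; exact hn.2)
      simpa using this
    have hscore : (PySem.List.pyRange 1 n 1).foldl
        (fun acc i => acc + (new_max - PySem.List.pyGetD As i 0)) 0
        = (n - 1) * new_max - ((As.drop 1).take (n.toNat - 1)).sum := by
      rw [← List.foldl_map (f := fun i => PySem.List.pyGetD As i 0)
            (g := fun acc x => acc + (new_max - x)), hmap, foldl_sub_sum]
      have hlen : (((As.drop 1).take (n.toNat - 1)).length : Int) = n - 1 := by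
        rw [List.length_take, List.length_drop, hlenAs]
        omega
      rw [hlen]; ring
    -- B's grouped scan sums the first n elements of the sorted list
    have hsmall : sumSmallLoop (PySem.List.sorted (PySem.Set.ofList A) (fun x => x) false)
        (PySem.Dict.counter A) 0 n = (As.take n.toNat).sum := by
      rw [sumSmallLoop_spec A (PySem.Dict.counter A)
            (fun v => PySem.Dict.getD_counter A v)
            (PySem.List.sorted (PySem.Set.ofList A) (fun x => x) false) 0 n hn.1,
          ← sorted_eq_flat_groups A, ← hAs]
      ring
    -- head of the sorted list is mn, so take n splits off mn
    obtain ⟨m, t, hcons⟩ : ∃ m t, As = m :: t := by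
      cases hAs' : As with
      | nil =>
        rw [hAs, PySem.List.sorted_eq_nil_iff] at hAs'
        exact absurd hAs' hA
      | cons m t => exact ⟨m, t, rfl⟩
    have hm : m = mn := head_sorted_eq_min A m t (hAs ▸ hcons)
    have htake : (As.take n.toNat).sum = mn + ((As.drop 1).take (n.toNat - 1)).sum := by
      rw [hcons, hm, List.drop_one, List.tail_cons]
      have h1 : n.toNat = (n.toNat - 1) + 1 := by omega
      rw [h1, List.take_succ_cons, List.sum_cons]
      simp
    -- A's count over the sorted list is the counter lookup
    have hcount : (PySem.List.count As mn : Int) = PySem.Dict.getD (PySem.Dict.counter A) mn 0 := by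
      rw [PySem.Dict.getD_counter, PySem.List.count_eq, hperm.count_eq mn]
    rw [hscore, hsmall, htake, hcount]
    ring
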